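-- pv_equiv track=rewrite | github.com/TzoharLary/zephyrproject | tools/autopts_guide_data.py | domain_allowed
-- ===== SOURCE A (Python) =====
-- from typing import Any, Dict, Iterable, Iterator, List, Optional, Sequence, Tuple
--
-- def domain_allowed(domain: str, whitelist: Iterable[str]) -> bool:
--     domain = (domain or "").lower()
--     for item in whitelist:
--         allowed = str(item).lower().strip()
--         if not allowed:
--             continue
--         if domain == allowed or domain.endswith("." + allowed):
--             return True
--     return False
-- ===== SOURCE B (Python) =====
-- def domain_allowed(domain, whitelist):
--     table = set()
--     for item in whitelist:
--         a = str(item).lower().strip()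
--         if a:
--             table.add(a)
--     d = (domain or "").lower()
--     if d in table:
--         return True
--     for i, ch in enumerate(d):
--         if ch == '.' and d[i + 1:] in table:
--             return True
--     return False
-- ===== Notes on version B (the rewrite author's own statement) =====
-- stated objective: alternative
-- what changed: B pre-builds a set of normalized whitelist entries once, then tests the domain's suffixes (the whole domain plus the tail after each dot) against that set, instead of scanning the whitelist and calling endswith per entry.
import Mathlib
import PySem

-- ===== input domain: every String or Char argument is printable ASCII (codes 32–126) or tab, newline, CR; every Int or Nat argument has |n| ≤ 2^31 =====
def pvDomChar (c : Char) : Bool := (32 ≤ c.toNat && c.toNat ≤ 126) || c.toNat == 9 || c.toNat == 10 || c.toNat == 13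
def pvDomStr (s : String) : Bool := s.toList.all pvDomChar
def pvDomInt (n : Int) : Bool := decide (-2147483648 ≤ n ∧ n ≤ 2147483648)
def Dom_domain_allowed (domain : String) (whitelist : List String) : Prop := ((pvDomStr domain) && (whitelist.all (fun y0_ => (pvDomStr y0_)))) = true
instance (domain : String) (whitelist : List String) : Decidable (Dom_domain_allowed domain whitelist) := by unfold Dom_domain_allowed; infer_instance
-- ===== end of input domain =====

-- B replaces A's per-entry endswith scan of the whitelist by a prebuilt set of
-- normalized entries checked against the domain's after-a-dot suffixes (alternative decomposition).


-- ===== PORT A =====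
-- allowed = str(item).lower().strip()
def pvNorm (item : String) : List Char :=
  PySem.Chars.strip (PySem.Chars.lower item.toList)

-- the 'for item in whitelist' loop with its early return
def pvLoopA (d : List Char) : List String → Bool
  | [] => false
  | item :: rest =>
    let allowed := pvNorm item
    if allowed = [] then pvLoopA d rest
    else if d = allowed ∨ PySem.Chars.endswith d ('.' :: allowed) then true
    else pvLoopA d rest

-- '(domain or "").lower()': lower("") = "" = lower(domain) when domain = "", so lowering directly is exact
def domain_allowed (domain : String) (whitelist : List String) : Bool :=
  pvLoopA (PySem.Chars.lower domain.toList) whitelist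

-- ===== PORT B =====
-- B normalizes entries with the same pvNorm helper (a = str(item).lower().strip())
-- the table-building loop: add each non-empty normalized entry to a set
def pvTableB (whitelist : List String) : PySem.Set (List Char) :=
  whitelist.foldl (fun t item =>
    let a := pvNorm item
    if a = [] then t else PySem.Set.add t a) PySem.Set.empty

-- 'for i, ch in enumerate(d): if ch == "." and d[i+1:] in table: return True'
def pvLoopB (table : PySem.Set (List Char)) : List Char → Bool
  | [] => false
  | c :: rest =>
    if c = '.' ∧ table.contains rest then true else pvLoopB table rest

def domain_allowed_alt (domain : String) (whitelist : List String) : Bool :=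
  let table := pvTableB whitelist
  let d := PySem.Chars.lower domain.toList
  if table.contains d then true else pvLoopB table d

-- ===== PRECONDITION & SPEC =====
def Spec_domain_allowed (domain : String) (whitelist : List String) (out : Bool) : Prop := out = domain_allowed_alt domain whitelist
instance (domain : String) (whitelist : List String) (out : Bool) : Decidable (Spec_domain_allowed domain whitelist out) := by unfold Spec_domain_allowed; infer_instance

-- ===== CLAIM (what is proved, stated in full; the proofs are below) =====
def Claim_equal_domain_allowed : Prop := ∀ (domain : String) (whitelist : List String), Dom_domain_allowed domain whitelist → Spec_domain_allowed domain whitelist (domain_allowed domain whitelist)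

-- ===== LEMMAS AND PROOFS =====

-- characterization of A's whitelist loop
theorem pvLoopA_iff (d : List Char) (wl : List String) :
    pvLoopA d wl = true ↔
      ∃ item ∈ wl, pvNorm item ≠ [] ∧
        (d = pvNorm item ∨ PySem.Chars.endswith d ('.' :: pvNorm item) = true) := by
  induction wl with
  | nil => simp [pvLoopA]
  | cons item rest ih =>
    simp only [pvLoopA]
    by_cases h0 : pvNorm item = []
    · simp [h0, ih]
    · simp only [h0, if_false]
      by_cases hm : d = pvNorm item ∨ PySem.Chars.endswith d ('.' :: pvNorm item) = true
      · simp only [hm, if_true, true_iff]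
        exact ⟨item, List.mem_cons_self .., h0, hm⟩
      · simp only [hm, if_false, ih]
        constructor
        · rintro ⟨a, ha, hne, hc⟩; exact ⟨a, List.mem_cons_of_mem _ ha, hne, hc⟩
        · rintro ⟨a, ha, hne, hc⟩
          rcases List.mem_cons.mp ha with h | h
          · exact absurd (h ▸ hc) hm
          · exact ⟨a, h, hne, hc⟩

-- membership in B's table (generalized over the accumulator for the foldl)
theorem mem_foldl_add (x : List Char) (wl : List String) (t : PySem.Set (List Char)) :
    x ∈ wl.foldl (fun t item =>
        let a := pvNorm item
        if a = [] then t else PySem.Set.add t a) t ↔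
      x ∈ t ∨ ∃ item ∈ wl, pvNorm item ≠ [] ∧ x = pvNorm item := by
  induction wl generalizing t with
  | nil => simp
  | cons item rest ih =>
    simp only [List.foldl_cons]
    by_cases h0 : pvNorm item = []
    · simp [h0, ih]
    · simp only [h0, if_false, ih, PySem.Set.mem_add]
      constructor
      · rintro (⟨ht | he⟩ | ⟨a, ha, hne, hc⟩)
        · exact Or.inl ht
        · exact Or.inr ⟨item, List.mem_cons_self .., h0, he⟩
        · exact Or.inr ⟨a, List.mem_cons_of_mem _ ha, hne, hc⟩
      · rintro (ht | ⟨a, ha, hne, hc⟩)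
        · exact Or.inl (Or.inl ht)
        · rcases List.mem_cons.mp ha with h | h
          · exact Or.inl (Or.inr (h ▸ hc))
          · exact Or.inr ⟨a, h, hne, hc⟩

theorem contains_pvTableB (x : List Char) (wl : List String) :
    (pvTableB wl).contains x = true ↔ ∃ item ∈ wl, pvNorm item ≠ [] ∧ x = pvNorm item := by
  rw [show ((pvTableB wl).contains x = true) ↔ x ∈ pvTableB wl from by simp [PySem.Set.contains]]
  simpa [PySem.Set.empty] using mem_foldl_add x wl PySem.Set.empty

-- characterization of B's suffix loop
theorem pvLoopB_iff (tb : PySem.Set (List Char)) (l : List Char) :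
    pvLoopB tb l = true ↔ ∃ r, ('.' :: r) <:+ l ∧ tb.contains r = true := by
  induction l with
  | nil => simp [pvLoopB]
  | cons c rest ih =>
    simp only [pvLoopB]
    by_cases h : c = '.' ∧ tb.contains rest = true
    · simp only [h, and_self, if_true, true_iff]
      exact ⟨rest, h.1 ▸ List.suffix_refl _, h.2⟩
    · simp only [h, if_false, ih]
      constructor
      · rintro ⟨r, hs, hc⟩; exact ⟨r, hs.trans (List.suffix_cons _ _), hc⟩
      · rintro ⟨r, hs, hc⟩
        rcases List.suffix_cons_iff.mp hs with he | hs'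
        · cases he; exact absurd ⟨rfl, hc⟩ h
        · exact ⟨r, hs', hc⟩

-- ===== VERDICT (by name: the statement is the Claim_ definition above) =====
theorem domain_allowed_spec : Claim_equal_domain_allowed := by
  intro domain whitelist _
  unfold Spec_domain_allowed domain_allowed domain_allowed_alt
  set d := PySem.Chars.lower domain.toList with hd
  rw [Bool.eq_iff_iff, pvLoopA_iff]
  by_cases hc : (pvTableB whitelist).contains d = true
  · simp only [hc, if_true, iff_true]
    rcases (contains_pvTableB d whitelist).mp hc with ⟨a, ha, hne, he⟩
    exact ⟨a, ha, hne, Or.inl he⟩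
  · rw [if_neg hc, pvLoopB_iff]
    constructor
    · rintro ⟨a, ha, hne, hor | hend⟩
      · exact absurd ((contains_pvTableB d whitelist).mpr ⟨a, ha, hne, hor⟩) hc
      · exact ⟨pvNorm a, (PySem.Chars.endswith_iff _ _).mp hend,
          (contains_pvTableB _ whitelist).mpr ⟨a, ha, hne, rfl⟩⟩
    · rintro ⟨r, hs, hcr⟩
      rcases (contains_pvTableB r whitelist).mp hcr with ⟨a, ha, hne, he⟩
      exact ⟨a, ha, hne, Or.inr ((PySem.Chars.endswith_iff _ _).mpr (he ▸ hs))⟩
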